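-- pv_equiv track=rewrite | github.com/Pandaemonium/CausalOctonionGraph | calc/test_gen001_single_generation.py | oct_basis_mul
-- ===== SOURCE A (Python) =====
-- FANO_TRIPLES_1indexed = [
--     (1, 2, 4),
--     (2, 3, 5),
--     (3, 4, 6),
--     (4, 5, 7),
--     (5, 6, 1),
--     (6, 7, 2),
--     (7, 1, 3),
-- ]
--
-- def oct_basis_mul(i, j):
--     """Multiply 1-indexed octonion basis elements (0=real, 1..7=imaginary).
--     Returns (result_index, sign)."""
--     if i == 0:
--         return j, 1
--     if j == 0:
--         return i, 1
--     if i == j: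
--         return 0, -1  # e_i^2 = -1
--     for (a, b, c) in FANO_TRIPLES_1indexed:
--         if (i, j) == (a, b):
--             return c, 1
--         if (i, j) == (b, c):
--             return a, 1
--         if (i, j) == (c, a):
--             return b, 1
--         if (i, j) == (b, a):
--             return c, -1
--         if (i, j) == (c, b):
--             return a, -1
--         if (i, j) == (a, c):
--             return b, -1
--     raise ValueError(f"No Fano triple for e{i}*e{j}")
-- ===== SOURCE B (Python) =====
-- OFFSET = (0, 3, 6, 1, 5, 4, 2)  # offset to add to i for each difference class d = (j-i) % 7
--
-- def oct_basis_mul(i, j):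
--     """Multiply 1-indexed octonion basis elements (0=real, 1..7=imaginary).
--     Returns (result_index, sign)."""
--     if i == 0:
--         return j, 1
--     if j == 0:
--         return i, 1
--     if i == j:
--         return 0, -1  # e_i^2 = -1
--     # Fano triples are the arithmetic progressions {a, a+1, a+3} mod 7 (residues 1..7),
--     # so the product is a closed form in the difference d = (j - i) % 7:
--     # cyclic order (d in {1,2,4}) gives sign +1, anticyclic gives -1,
--     # and the result index is i shifted by a fixed offset depending on d.
--     d = (j - i) % 7
--     sign = 1 if d in (1, 2, 4) else -1
--     return (i - 1 + OFFSET[d]) % 7 + 1, sign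
-- ===== Notes on version B (the rewrite author's own statement) =====
-- stated objective: alternative
-- what changed: Replaces the scan over the Fano-triple list (six pattern tests per triple) by an arithmetic closed form: the triples are the progressions {a,a+1,a+3} mod 7, so the result index and sign are computed directly from the difference d = (j - i) % 7 with a fixed 7-entry offset table.
import Mathlib
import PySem

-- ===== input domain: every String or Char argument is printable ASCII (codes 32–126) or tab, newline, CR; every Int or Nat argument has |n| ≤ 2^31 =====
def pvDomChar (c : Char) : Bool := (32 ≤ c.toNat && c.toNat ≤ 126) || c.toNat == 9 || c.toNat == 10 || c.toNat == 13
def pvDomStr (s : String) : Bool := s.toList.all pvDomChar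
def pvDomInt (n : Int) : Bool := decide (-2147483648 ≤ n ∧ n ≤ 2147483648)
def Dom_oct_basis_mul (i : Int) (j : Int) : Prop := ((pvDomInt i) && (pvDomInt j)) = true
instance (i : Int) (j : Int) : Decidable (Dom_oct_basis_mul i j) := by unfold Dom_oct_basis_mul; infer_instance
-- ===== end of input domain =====

-- B replaces A's scan over the Fano-triple list by an arithmetic closed form in (j - i) % 7 (objective: alternative).

-- ===== PORT A =====
def fanoTriples : List (Int × Int × Int) :=
  [(1, 2, 4), (2, 3, 5), (3, 4, 6), (4, 5, 7), (5, 6, 1), (6, 7, 2), (7, 1, 3)]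

-- the for-loop of A: scan the triples, first matching pattern wins; none = the final raise
def scanTriples (i j : Int) : List (Int × Int × Int) → Option (Int × Int)
  | [] => none
  | (a, b, c) :: rest =>
    if (i, j) = (a, b) then some (c, 1)
    else if (i, j) = (b, c) then some (a, 1)
    else if (i, j) = (c, a) then some (b, 1)
    else if (i, j) = (b, a) then some (c, -1)
    else if (i, j) = (c, b) then some (a, -1)
    else if (i, j) = (a, c) then some (b, -1)
    else scanTriples i j rest

def oct_basis_mul (i : Int) (j : Int) : Int × Int :=
  if i = 0 then (j, 1)
  else if j = 0 then (i, 1)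
  else if i = j then (0, -1)
  else (scanTriples i j fanoTriples).getD (0, 0)  -- none = ValueError, excluded by Pre_

-- ===== PORT B =====
def offsetTable : List Int := [0, 3, 6, 1, 5, 4, 2]

def oct_basis_mul_alt (i : Int) (j : Int) : Int × Int :=
  if i = 0 then (j, 1)
  else if j = 0 then (i, 1)
  else if i = j then (0, -1)
  else
    let d : Int := PySem.Int.mod (j - i) 7
    let sign : Int := if d = 1 ∨ d = 2 ∨ d = 4 then 1 else -1
    -- OFFSET[d]: tuple index, d ∈ 0..6 from the mod, so in range
    (PySem.Int.mod (i - 1 + (PySem.List.pyGet? offsetTable d).getD 0) 7 + 1, sign)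

-- ===== PRECONDITION & SPEC =====
-- Pre_ excludes exactly the inputs where A raises ValueError (both nonzero, distinct, outside 1..7)
def Pre_oct_basis_mul (i : Int) (j : Int) : Prop :=
  i = 0 ∨ j = 0 ∨ i = j ∨ (1 ≤ i ∧ i ≤ 7 ∧ 1 ≤ j ∧ j ≤ 7)
instance (i : Int) (j : Int) : Decidable (Pre_oct_basis_mul i j) := by
  unfold Pre_oct_basis_mul; infer_instance
def pvWitness_oct_basis_mul : Int × Int := (2, 5)

def Spec_oct_basis_mul (i : Int) (j : Int) (out : Int × Int) : Prop := out = oct_basis_mul_alt i j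
instance (i : Int) (j : Int) (out : Int × Int) : Decidable (Spec_oct_basis_mul i j out) := by
  unfold Spec_oct_basis_mul; infer_instance

-- ===== CLAIM =====
def Claim_equal_oct_basis_mul : Prop := ∀ (i : Int) (j : Int), Dom_oct_basis_mul i j → Pre_oct_basis_mul i j → Spec_oct_basis_mul i j (oct_basis_mul i j)

-- ===== LEMMAS AND PROOFS =====

-- ===== VERDICT =====
set_option maxRecDepth 8192 in
theorem oct_basis_mul_spec : Claim_equal_oct_basis_mul := by
  intro i j _ hpre
  unfold Spec_oct_basis_mul oct_basis_mul oct_basis_mul_alt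
  by_cases hi : i = 0
  · simp [hi]
  by_cases hj : j = 0
  · simp [hi, hj]
  by_cases hij : i = j
  · simp [hj, hij]
  · have hb : 1 ≤ i ∧ i ≤ 7 ∧ 1 ≤ j ∧ j ≤ 7 := by
      rcases hpre with h | h | h | h <;> first | exact absurd h ‹_› | exact h
    simp only [hi, hj, hij, if_false]
    obtain ⟨h1, h2, h3, h4⟩ := hb
    interval_cases i <;> interval_cases j <;> revert hij <;> decide
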